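-- pv_equiv track=rewrite | github.com/wberkhof/knowit | 2020/luke2_prime.py | get_delivered
-- ===== SOURCE A (Python) =====
-- def get_delivered(primes, n):
--     delivered = []
--     next_p = -1
--     for p in range(0, n):
--         if p > next_p:
--             if '7' in str(p):
--                 next_p = p + min(primes, key=lambda x:abs(x-p))
--             else:
--                 delivered.append(p)
--
--     return delivered
-- ===== SOURCE B (Python) =====
-- def _has7(p):
--     while p > 0:
--         if p % 10 == 7:
--             return True
--         p //= 10
--     return False
--
--
-- def get_delivered(primes, n):
--     delivered = []
--     p = 0
--     while p < n:
--         if _has7(p):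
--             nearest = min(primes, key=lambda x: abs(x - p))
--             p += max(nearest, 0) + 1
--         else:
--             delivered.append(p)
--             p += 1
--     return delivered
-- ===== Notes on version B (the rewrite author's own statement) =====
-- stated objective: alternative
-- what changed: B replaces A's scan over the whole range with a sentinel guard by a jump-ahead while loop that skips past each prime-sized gap directly, and tests for a digit 7 arithmetically (%10 // //10) instead of converting the position to a string.
import Mathlib
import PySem

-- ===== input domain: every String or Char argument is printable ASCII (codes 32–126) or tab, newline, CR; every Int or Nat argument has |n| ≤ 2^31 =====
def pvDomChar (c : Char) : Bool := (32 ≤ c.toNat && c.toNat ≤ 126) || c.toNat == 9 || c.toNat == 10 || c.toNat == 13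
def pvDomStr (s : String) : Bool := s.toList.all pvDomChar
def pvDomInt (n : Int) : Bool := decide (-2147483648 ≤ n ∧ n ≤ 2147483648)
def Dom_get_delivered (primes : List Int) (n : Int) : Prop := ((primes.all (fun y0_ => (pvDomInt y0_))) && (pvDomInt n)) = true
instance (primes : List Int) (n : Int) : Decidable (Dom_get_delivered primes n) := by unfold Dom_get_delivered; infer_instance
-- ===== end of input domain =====

-- B replaces A's scan over the whole range (with sentinel guard p > next_p) by a
-- jump-ahead while loop that advances past each skipped gap directly, and tests for
-- a digit 7 arithmetically instead of converting the position to a string.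

-- ===== PORT A =====
def get_delivered (primes : List Int) (n : Int) : List Int :=
  ((PySem.List.pyRange 0 n 1).foldl
    (fun st p =>
      if st.2 < p then
        if PySem.Str.isIn "7" (PySem.Int.toStr p) then
          (st.1, p + ((PySem.List.min? primes (fun x => |x - p|)).getD 0))
        else
          (st.1 ++ [p], st.2)
      else st)
    (([] : List Int), (-1 : Int))).1

-- ===== PORT B =====
-- `while p > 0` digit loop of _has7, with fuel (p.toNat + 1 iterations always suffice)
def has7Go : Nat → Int → Bool
  | 0, _ => false
  | f+1, p =>
    if 0 < p then
      if PySem.Int.mod p 10 == 7 then true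
      else has7Go f (PySem.Int.floordiv p 10)
    else false

def has7 (p : Int) : Bool := has7Go (p.toNat + 1) p

-- `while p < n` delivery loop of B, with fuel (n.toNat iterations always suffice:
-- every iteration advances p by at least 1)
def goB (primes : List Int) (n : Int) : Nat → Int → List Int
  | 0, _ => []
  | f+1, p =>
    if p < n then
      if has7 p then
        goB primes n f (p + (max ((PySem.List.min? primes (fun x => |x - p|)).getD 0) 0 + 1))
      else
        p :: goB primes n f (p + 1)
    else []

def get_delivered_alt (primes : List Int) (n : Int) : List Int := goB primes n n.toNat 0

-- ===== PRECONDITION & SPEC =====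
-- Pre_ excludes exactly the inputs where Python raises: with primes = [] and n ≥ 8 the
-- position 7 is reached and min([]) raises ValueError (in both A and B).
def Pre_get_delivered (primes : List Int) (n : Int) : Prop := primes ≠ [] ∨ n ≤ 7
instance (primes : List Int) (n : Int) : Decidable (Pre_get_delivered primes n) := by unfold Pre_get_delivered; infer_instance

def pvWitness_get_delivered : List Int × Int := ([2, 3, 5], 20)

def Spec_get_delivered (primes : List Int) (n : Int) (out : List Int) : Prop := out = get_delivered_alt primes n
instance (primes : List Int) (n : Int) (out : List Int) : Decidable (Spec_get_delivered primes n out) := by unfold Spec_get_delivered; infer_instance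

-- ===== CLAIM (what is proved, stated in full; the proofs are below) =====
def Claim_equal_get_delivered : Prop := ∀ (primes : List Int) (n : Int), Dom_get_delivered primes n → Pre_get_delivered primes n → Spec_get_delivered primes n (get_delivered primes n)

-- ===== LEMMAS AND PROOFS =====

lemma digitChar_seven (d : Nat) (hd : d < 10) : (Nat.digitChar d = '7') ↔ d = 7 := by
  interval_cases d <;> simp [Nat.digitChar]

-- proof-side Nat mirror of the digit loop
def natHas7Go : Nat → Nat → Bool
  | 0, _ => false
  | f+1, m => if m = 0 then false else if m % 10 = 7 then true else natHas7Go f (m / 10)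

def natHas7 (m : Nat) : Bool := natHas7Go (m + 1) m

lemma natHas7Go_fuel : ∀ (f f' m : Nat), m < f → m < f' → natHas7Go f m = natHas7Go f' m := by
  intro f
  induction f with
  | zero => intro f' m h _; omega
  | succ f ih =>
    intro f' m h h'
    cases f' with
    | zero => omega
    | succ f' =>
      simp only [natHas7Go]
      rcases Nat.eq_zero_or_pos m with rfl | hm
      · simp
      · have hm0 : m ≠ 0 := by omega
        rw [if_neg hm0, if_neg hm0]
        by_cases h7 : m % 10 = 7
        · rw [if_pos h7, if_pos h7]
        · rw [if_neg h7, if_neg h7]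
          have hd : m / 10 < m := Nat.div_lt_self hm (by norm_num)
          exact ih f' _ (by omega) (by omega)

lemma natHas7_unfold (m : Nat) (hm : 0 < m) :
    natHas7 m = (decide (m % 10 = 7) || natHas7 (m / 10)) := by
  have hm0 : m ≠ 0 := by omega
  simp only [natHas7, natHas7Go, if_neg hm0]
  by_cases h7 : m % 10 = 7
  · simp [h7]
  · rw [if_neg h7]
    have hdec : decide (m % 10 = 7) = false := by simp [h7]
    rw [hdec, Bool.false_or]
    exact natHas7Go_fuel m (m / 10 + 1) (m / 10)
      (Nat.div_lt_self hm (by norm_num)) (Nat.lt_succ_self _)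

lemma has7Go_cast : ∀ (f m : Nat), has7Go f (m : Int) = natHas7Go f m := by
  intro f
  induction f with
  | zero => intro m; rfl
  | succ f ih =>
    intro m
    rcases Nat.eq_zero_or_pos m with rfl | hm
    · simp [has7Go, natHas7Go]
    · have hp : (0 : Int) < (m : Int) := by exact_mod_cast hm
      have hm0 : m ≠ 0 := by omega
      simp only [has7Go, natHas7Go, if_pos hp, if_neg hm0]
      have hmod : PySem.Int.mod (m : Int) 10 = ((m % 10 : Nat) : Int) := by
        exact_mod_cast PySem.Int.mod_natCast m 10
      have hdiv : PySem.Int.floordiv (m : Int) 10 = ((m / 10 : Nat) : Int) := by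
        exact_mod_cast PySem.Int.floordiv_natCast m 10
      rw [hmod, hdiv, ih (m / 10)]
      by_cases h7 : m % 10 = 7
      · have hb : (((m % 10 : Nat) : Int) == 7) = true := by
          simp only [beq_iff_eq]; exact_mod_cast h7
        rw [if_pos h7, hb]; simp
      · have hb : (((m % 10 : Nat) : Int) == 7) = false := by
          simp only [beq_eq_false_iff_ne, ne_eq]
          exact_mod_cast h7
        rw [if_neg h7, hb]; simp

lemma has7_cast (m : Nat) : has7 (m : Int) = natHas7 m := by
  simp only [has7, natHas7, Int.toNat_natCast]
  exact has7Go_cast (m + 1) m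

lemma mem_toDigitsCore : ∀ (f m : Nat) (l : List Char), m < f →
    ('7' ∈ Nat.toDigitsCore 10 f m l ↔ natHas7 m = true ∨ '7' ∈ l) := by
  intro f
  induction f with
  | zero => intro m l h; omega
  | succ f ih =>
    intro m l hm
    have hchar : ∀ d : Nat, d < 10 → (('7' : Char) = Nat.digitChar d ↔ d = 7) := by
      intro d hd; rw [eq_comm]; exact digitChar_seven d hd
    simp only [Nat.toDigitsCore]
    by_cases h0 : m / 10 = 0
    · rw [if_pos h0, List.mem_cons]
      rcases Nat.eq_zero_or_pos m with rfl | hpos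
      · simp [show ¬ (('7' : Char) = Nat.digitChar (0 % 10)) from by decide,
              show natHas7 0 = false from rfl]
      · rw [natHas7_unfold m hpos, h0, show natHas7 0 = false from rfl, Bool.or_false]
        simp [hchar (m % 10) (Nat.mod_lt _ (by norm_num))]
    · rw [if_neg h0]
      have hpos : 0 < m := by omega
      have hlt : m / 10 < f := by
        have := Nat.div_lt_self hpos (show 1 < 10 by norm_num)
        omega
      rw [ih (m / 10) _ hlt, List.mem_cons, natHas7_unfold m hpos]
      simp only [Bool.or_eq_true, decide_eq_true_eq,
                 hchar (m % 10) (Nat.mod_lt _ (by norm_num))]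
      tauto

-- A's string test '7' in str(p) agrees with B's arithmetic digit test (for 0 ≤ p)
lemma isIn_seven (p : Int) (hp : 0 ≤ p) :
    PySem.Str.isIn "7" (PySem.Int.toStr p) = has7 p := by
  have h2 : has7 p = natHas7 p.toNat := by
    conv_lhs => rw [← Int.toNat_of_nonneg hp]
    exact has7_cast p.toNat
  rw [Bool.eq_iff_iff, PySem.Str.isIn_eq, PySem.Chars.isIn_iff_infix, PySem.Int.toList_toStr]
  have h1 : PySem.Int.toChars p = Nat.toDigits 10 p.toNat := by
    simp [PySem.Int.toChars, not_lt.mpr hp]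
  have h3 : ("7" : String).toList = ['7'] := by decide
  rw [h1, h3, List.singleton_infix_iff]
  simp only [Nat.toDigits]
  rw [mem_toDigitsCore _ _ _ (Nat.lt_succ_self _), h2]
  simp

-- enough fuel: goB does not depend on the fuel once it covers the remaining distance
lemma goB_fuel (primes : List Int) (n : Int) : ∀ (f f' : Nat) (p : Int),
    (n - p).toNat ≤ f → (n - p).toNat ≤ f' →
    goB primes n f p = goB primes n f' p := by
  intro f
  induction f with
  | zero =>
    intro f' p h _
    have hpn : ¬ p < n := by omega
    cases f' with
    | zero => rfl
    | succ f' => simp [goB, hpn]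
  | succ f ih =>
    intro f' p h h'
    cases f' with
    | zero =>
      have hpn : ¬ p < n := by omega
      simp [goB, hpn]
    | succ f' =>
      simp only [goB]
      by_cases hpn : p < n
      · simp only [if_pos hpn]
        by_cases h7 : has7 p
        · simp only [h7, if_pos]
          have hmax : (0 : Int) ≤ max ((PySem.List.min? primes (fun x => |x - p|)).getD 0) 0 :=
            le_max_right _ _
          exact ih f' _ (by omega) (by omega)
        · simp only [h7, Bool.false_eq_true, if_neg, not_false_eq_true]
          rw [ih f' (p + 1) (by omega) (by omega)]
      · simp [hpn]

-- the main loop correspondence: A's fold over range(p0, n) with sentinel next_p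
-- produces exactly acc ++ B's jump loop started at max p0 (next_p + 1)
lemma loop_eq (primes : List Int) (n : Int) : ∀ (k : Nat) (p0 next_p : Int) (acc : List Int),
    0 ≤ p0 → (n - p0).toNat ≤ k →
    ((PySem.List.pyRange p0 n 1).foldl
      (fun st p =>
        if st.2 < p then
          if PySem.Str.isIn "7" (PySem.Int.toStr p) then
            (st.1, p + ((PySem.List.min? primes (fun x => |x - p|)).getD 0))
          else
            (st.1 ++ [p], st.2)
        else st)
      (acc, next_p)).1
    = acc ++ goB primes n (n - max p0 (next_p + 1)).toNat (max p0 (next_p + 1)) := by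
  intro k
  induction k with
  | zero =>
    intro p0 next_p acc hp0 hk
    have hpn : ¬ p0 < n := by omega
    rw [PySem.List.pyRange_one_eq_nil (by omega)]
    have h0 : (n - max p0 (next_p + 1)).toNat = 0 := by omega
    simp [h0, goB]
  | succ k ih =>
    intro p0 next_p acc hp0 hk
    by_cases hpn : p0 < n
    · rw [PySem.List.pyRange_one_cons hpn]
      simp only [List.foldl_cons]
      by_cases hg : next_p < p0
      · have hmax : max p0 (next_p + 1) = p0 := by omega
        obtain ⟨t, ht⟩ : ∃ t, (n - p0).toNat = t + 1 := ⟨(n - p0).toNat - 1, by omega⟩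
        rw [hmax, ht]
        by_cases h7 : PySem.Str.isIn "7" (PySem.Int.toStr p0) = true
        · simp only [if_pos hg, if_pos h7]
          rw [ih (p0 + 1) _ acc (by omega) (by omega)]
          have h7' : has7 p0 = true := by rw [← isIn_seven p0 hp0]; exact h7
          simp only [goB, if_pos hpn, h7', if_pos]
          congr 1
          set m := (PySem.List.min? primes (fun x => |x - p0|)).getD 0 with hm
          have harg : max (p0 + 1) (p0 + m + 1) = p0 + (max m 0 + 1) := by omega
          rw [harg]
          have hadv : (0 : Int) ≤ max m 0 := le_max_right _ _
          exact goB_fuel primes n _ _ _ (by omega) (by omega)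
        · simp only [if_pos hg, if_neg h7]
          rw [ih (p0 + 1) next_p (acc ++ [p0]) (by omega) (by omega)]
          have h7' : has7 p0 = false := by
            rw [← isIn_seven p0 hp0]; exact Bool.eq_false_iff.mpr h7
          simp only [goB, if_pos hpn, h7', Bool.false_eq_true, if_neg, not_false_eq_true]
          have harg : max (p0 + 1) (next_p + 1) = p0 + 1 := by omega
          rw [harg, List.append_assoc, List.singleton_append]
          congr 2
          exact goB_fuel primes n _ _ _ (by omega) (by omega)
      · simp only [if_neg hg]
        rw [ih (p0 + 1) next_p acc (by omega) (by omega)]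
        have harg : max (p0 + 1) (next_p + 1) = max p0 (next_p + 1) := by omega
        rw [harg]
    · rw [PySem.List.pyRange_one_eq_nil (by omega)]
      have h0 : (n - max p0 (next_p + 1)).toNat = 0 := by omega
      simp [h0, goB]

-- ===== VERDICT (by name: the statement is the Claim_ definition above) =====
theorem get_delivered_spec : Claim_equal_get_delivered := by
  intro primes n _dom _pre
  unfold Spec_get_delivered get_delivered get_delivered_alt
  rw [loop_eq primes n n.toNat 0 (-1) [] le_rfl (by omega)]
  have h1 : max (0 : Int) (-1 + 1) = 0 := by omega
  rw [h1]
  simp
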